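-- pv_equiv track=rewrite | github.com/lukehenderson1996/pythonNotes | scripts/utils.py | listConv
-- ===== SOURCE A (Python) =====
-- def listConv(listOfDict):
--     '''Converts list of dictionaries to dictionary of lists\n
--     Args:
--         listOfDict [list of dicts]:
--     Return:
--         [dict] dict of lists'''
--     ret = {}
--     for item in listOfDict:
--         for key, value in item.items():
--             if key not in ret:
--                 ret[key] = []
--             ret[key].append(value)
--     return ret
-- ===== SOURCE B (Python) =====
-- def listConv(listOfDict):
--     '''Converts list of dictionaries to dictionary of lists'''
--     keys = dict.fromkeys(k for d in listOfDict for k in d)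
--     return {k: [d[k] for d in listOfDict if k in d] for k in keys}
-- ===== Notes on version B (the rewrite author's own statement) =====
-- stated objective: alternative
-- what changed: A does one flat pass appending each value into a growing dict of lists; B first builds the ordered set of first-appearance keys with dict.fromkeys and then, per key, collects that key's values by re-scanning the list (a transposed keys-by-items pass).
import Mathlib
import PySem

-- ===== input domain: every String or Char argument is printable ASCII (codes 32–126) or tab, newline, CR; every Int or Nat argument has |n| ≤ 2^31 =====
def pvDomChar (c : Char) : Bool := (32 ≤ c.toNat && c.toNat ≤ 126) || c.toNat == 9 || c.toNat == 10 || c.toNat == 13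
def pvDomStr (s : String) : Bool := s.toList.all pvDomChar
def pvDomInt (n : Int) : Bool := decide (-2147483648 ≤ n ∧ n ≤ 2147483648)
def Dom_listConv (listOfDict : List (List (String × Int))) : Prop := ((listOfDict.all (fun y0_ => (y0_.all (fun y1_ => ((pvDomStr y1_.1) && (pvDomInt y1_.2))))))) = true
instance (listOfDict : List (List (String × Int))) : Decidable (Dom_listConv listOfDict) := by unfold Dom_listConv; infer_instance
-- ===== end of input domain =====

-- B replaces A's single flat pass (grow a dict of lists as values stream by) with an
-- index-build (ordered first-appearance key set) followed by a transposed per-key re-scan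
-- of the list; same cost class, genuinely different traversal (objective: alternative).

-- ===== PORT A =====
-- Each 'item' is a Python dict represented by its assoc list; 'item.items()' is
-- (PySem.Dict.ofList item).items (exact: dict construction keeps first position /
-- last value for duplicate keys in the assoc list).
def pvStepA (ret : PySem.Dict String (List Int)) (kv : String × Int) : PySem.Dict String (List Int) :=
  -- if key not in ret: ret[key] = []
  let r1 := if ret.contains kv.1 = false then ret.insert kv.1 [] else ret
  -- ret[key].append(value)
  r1.insert kv.1 (r1.getD kv.1 [] ++ [kv.2])

def listConv (listOfDict : List (List (String × Int))) : List (String × List Int) :=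
  (listOfDict.foldl (fun ret item => ((PySem.Dict.ofList item).items).foldl pvStepA ret)
    PySem.Dict.empty).items

-- ===== PORT B =====
def listConv_alt (listOfDict : List (List (String × Int))) : List (String × List Int) :=
  let ds := listOfDict.map (fun item => PySem.Dict.ofList item)
  -- keys = dict.fromkeys(k for d in listOfDict for k in d)
  let keys := PySem.List.dedup (ds.flatMap (fun d => d.keys))
  -- {k: [d[k] for d in listOfDict if k in d] for k in keys}
  keys.map (fun k => (k, ds.filterMap (fun d => d.get? k)))

-- ===== PRECONDITION & SPEC =====
def Spec_listConv (listOfDict : List (List (String × Int))) (out : List (String × List Int)) : Prop := out = listConv_alt listOfDict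
instance (listOfDict : List (List (String × Int))) (out : List (String × List Int)) : Decidable (Spec_listConv listOfDict out) := by unfold Spec_listConv; infer_instance

-- ===== CLAIM (what is proved, stated in full; the proofs are below) =====
def Claim_equal_listConv : Prop := ∀ (listOfDict : List (List (String × Int))), Dom_listConv listOfDict → Spec_listConv listOfDict (listConv listOfDict)

-- ===== LEMMAS AND PROOFS =====

-- The common normal form: keys in first-appearance order, each paired with all its
-- values drawn from the flattened pair stream.
def pvSpec (ps : List (String × Int)) : List (String × List Int) :=
  (PySem.List.dedup (ps.map (·.1))).map
    (fun k => (k, (ps.filter (fun p => p.1 == k)).map (·.2)))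

lemma pvSpec_map_fst (ps : List (String × Int)) :
    (pvSpec ps).map (·.1) = PySem.List.dedup (ps.map (·.1)) := by
  simp [pvSpec, List.map_map, Function.comp_def]

lemma core_items (ps : List (String × Int)) :
    (ps.foldl pvStepA PySem.Dict.empty).items = pvSpec ps := by
  induction ps using List.reverseRecOn with
  | nil => rfl
  | append_singleton ps p ih =>
    obtain ⟨k, v⟩ := p
    set c := ps.foldl pvStepA PySem.Dict.empty with hc
    rw [List.foldl_append]
    have hkeys : c.keys = PySem.List.dedup (ps.map (·.1)) := by
      show c.items.map (·.1) = _
      rw [ih, pvSpec_map_fst]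
    have hnodup : c.keys.Nodup := by rw [hkeys]; exact PySem.List.nodup_dedup _
    by_cases hk : k ∈ ps.map (·.1)
    · -- key already present
      have hcont : c.contains k = true := by
        rw [PySem.Dict.contains_eq_decide_mem_keys, hkeys]
        simpa [PySem.List.mem_dedup] using hk
      have hmem : (k, (ps.filter (fun p => p.1 == k)).map (·.2)) ∈ c.items := by
        rw [ih]
        simp only [pvSpec]
        exact List.mem_map_of_mem ((PySem.List.mem_dedup (ps.map (·.1)) k).mpr hk)
      have hgetD : c.getD k [] = (ps.filter (fun p => p.1 == k)).map (·.2) :=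
        PySem.Dict.getD_of_mem_items c hmem hnodup []
      simp only [List.foldl_cons, List.foldl_nil, pvStepA]
      rw [← hc, hcont]
      rw [if_neg (by simp), hgetD, PySem.Dict.items_insert_of_contains _ _ hcont, ih]
      have hded : PySem.List.dedup ((ps ++ [(k, v)]).map (·.1))
          = PySem.List.dedup (ps.map (·.1)) := by
        show PySem.Set.ofList ((ps ++ [(k, v)]).map (·.1)) = PySem.Set.ofList (ps.map (·.1))
        rw [List.map_append]
        exact (PySem.Set.ofList_append_singleton _ _).trans
          (PySem.Set.add_of_mem ((PySem.Set.mem_ofList (ps.map (·.1)) k).mpr hk))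
      simp only [pvSpec, hded, List.map_map]
      apply List.map_congr_left
      intro k' _
      simp only [Function.comp_def, List.filter_append, List.map_append]
      by_cases hkk : k' = k
      · subst hkk; simp
      · simp [hkk, Ne.symm hkk]
    · -- fresh key
      have hcont : c.contains k = false := by
        rw [PySem.Dict.contains_eq_decide_mem_keys, hkeys]
        simpa [PySem.List.mem_dedup] using hk
      have hnotmem : k ∉ c.keys := by rw [hkeys]; simpa [PySem.List.mem_dedup] using hk
      simp only [List.foldl_cons, List.foldl_nil, pvStepA]
      rw [← hc, hcont]
      rw [if_pos rfl]
      have hitems1 : (c.insert k []).items = c.items ++ [(k, [])] :=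
        PySem.Dict.items_insert_of_not_contains c _ hcont
      have hkeys1 : (c.insert k []).keys = c.keys ++ [k] :=
        PySem.Dict.keys_insert_of_not_contains c _ hcont
      have hnodup1 : (c.insert k []).keys.Nodup := by
        rw [hkeys1]
        simpa [List.nodup_append] using ⟨hnodup, fun a ha (h : a = k) => hnotmem (h ▸ ha)⟩
      have hgetD : (c.insert k []).getD k [] = [] := by
        refine PySem.Dict.getD_of_mem_items _ ?_ hnodup1 []
        rw [hitems1]; simp
      have hcont1 : (c.insert k []).contains k = true :=
        PySem.Dict.contains_insert_self c k []
      rw [hgetD, PySem.Dict.items_insert_of_contains _ _ hcont1, hitems1]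
      have hfix : c.items.map (fun p => if (p.1 == k) = true then (k, ([] : List Int) ++ [v]) else p)
          = c.items := by
        conv_rhs => rw [← List.map_id c.items]
        apply List.map_congr_left
        intro q hq
        have : q.1 ∈ c.keys := List.mem_map_of_mem hq
        have hne : q.1 ≠ k := fun h => hnotmem (h ▸ this)
        simp [hne]
      rw [List.map_append, hfix, ih]
      have hded : PySem.List.dedup (ps.map (·.1) ++ [k])
          = PySem.List.dedup (ps.map (·.1)) ++ [k] := by
        show PySem.Set.ofList (ps.map (·.1) ++ [k]) = _
        exact (PySem.Set.ofList_append_singleton _ _).trans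
          (PySem.Set.add_of_not_mem (fun h => hk ((PySem.List.mem_dedup _ _).mp h)))
      have hfilt0 : (ps.filter (fun p => p.1 == k)) = [] := by
        rw [List.filter_eq_nil_iff]
        intro q hq
        simp only [beq_iff_eq]
        exact fun h => hk (h ▸ List.mem_map_of_mem hq)
      have hkv1 : ((ps ++ [(k, v)]).map (·.1)) = ps.map (·.1) ++ [k] := by simp
      simp only [pvSpec]
      rw [hkv1, hded, List.map_append, List.map_singleton]
      congr 1
      · apply List.map_congr_left
        intro k' hk'
        have hne : k' ≠ k := fun h => hk (h ▸ (PySem.List.mem_dedup _ _).mp hk')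
        simp [List.filter_append, Ne.symm hne]
      · simp [List.filter_append, hfilt0]

lemma dict_filter (lst : List (String × Int)) (k : String)
    (hn : (lst.map (·.1)).Nodup) :
    (lst.filter (fun p => p.1 == k)).map (·.2)
      = ((PySem.Dict.mk lst).get? k).toList := by
  induction lst with
  | nil => simp [PySem.Dict.get?]
  | cons q rest ih =>
    obtain ⟨a, b⟩ := q
    simp only [List.map_cons, List.nodup_cons] at hn
    rw [PySem.Dict.get?_mk_cons]
    by_cases hak : a = k
    · subst hak
      have hfilt : (rest.filter (fun p => p.1 == a)) = [] := by
        rw [List.filter_eq_nil_iff]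
        intro q hq
        simp only [beq_iff_eq]
        exact fun h => hn.1 (h ▸ List.mem_map_of_mem hq)
      simp [hfilt]
    · simp only [List.filter_cons]
      rw [if_neg (by simpa using hak), if_neg (by simpa using hak)]
      exact ih hn.2

lemma filterMap_get? (l : List (List (String × Int))) (k : String) :
    (l.map (fun item => PySem.Dict.ofList item)).filterMap (fun d => d.get? k)
      = ((l.flatMap (fun item => (PySem.Dict.ofList item).items)).filter
          (fun p => p.1 == k)).map (·.2) := by
  induction l with
  | nil => simp
  | cons item rest ih =>
    simp only [List.map_cons, List.filterMap_cons, List.flatMap_cons, List.filter_append,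
      List.map_append, ← ih]
    have hn : ((PySem.Dict.ofList item).items.map (·.1)).Nodup :=
      PySem.Dict.nodup_keys_ofList item
    have := dict_filter (PySem.Dict.ofList item).items k hn
    rw [this]
    cases (PySem.Dict.ofList item).get? k <;> simp

lemma alt_eq_spec (l : List (List (String × Int))) :
    listConv_alt l = pvSpec (l.flatMap (fun item => (PySem.Dict.ofList item).items)) := by
  simp only [listConv_alt, pvSpec]
  have hkeys : (l.map (fun item => PySem.Dict.ofList item)).flatMap (fun d => d.keys)
      = (l.flatMap (fun item => (PySem.Dict.ofList item).items)).map (·.1) := by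
    rw [List.map_flatMap, List.flatMap_map]
    rfl
  rw [hkeys]
  apply List.map_congr_left
  intro k _
  rw [filterMap_get? l k]

-- ===== VERDICT (by name: the statement is the Claim_ definition above) =====
theorem listConv_spec : Claim_equal_listConv := by
  intro l _
  show listConv l = listConv_alt l
  rw [alt_eq_spec, listConv, List.foldl_flatMap.symm.trans rfl]
  · exact core_items _
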